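-- pv_equiv track=rewrite | github.com/SodaVolcano/leetcode-grind | solutions/2610.convert-an-array-into-a-2-d-array-with-conditions.py | dict_approach
-- ===== SOURCE A (Python) =====
-- def dict_approach(nums: list[int]) -> list[list[int]]:
--     # Bad runtime and memory: ~65% & 16.6%
--     # Count up frequency of each number and use freq count to construct subarrays
--     counts = {}
--     # Count how many times each number occur
--     for i in nums:
--         counts[i] = 0 if i not in counts.keys() else counts[i] + 1
--
--     ans = []
--     n_counts = 0
--     while True:
--         sublist = [num for num in counts.keys() if counts[num] >= n_counts]
--
--         if not sublist:
--             return ans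
--
--         ans.append(sublist)
--         n_counts += 1
-- ===== SOURCE B (Python) =====
-- def dict_approach(nums: list[int]) -> list[list[int]]:
--     # Count each value once, then distribute the k-th copy of each value to row k.
--     # One pass over the counter, O(total output size) instead of re-scanning all
--     # keys for every row.
--     counts = {}
--     for i in nums:
--         counts[i] = counts.get(i, 0) + 1
--     rows = []
--     for num, c in counts.items():
--         for k in range(c):
--             if k == len(rows):
--                 rows.append([])
--             rows[k].append(num)
--     return rows
-- ===== Notes on version B (the rewrite author's own statement) =====
-- stated objective: faster
-- what changed: Instead of repeatedly re-filtering the whole key set once per output row inside a while-loop, B counts each value once and in a single pass over the counter appends the k-th copy of each value to row k, building all rows simultaneously.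
import Mathlib
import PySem

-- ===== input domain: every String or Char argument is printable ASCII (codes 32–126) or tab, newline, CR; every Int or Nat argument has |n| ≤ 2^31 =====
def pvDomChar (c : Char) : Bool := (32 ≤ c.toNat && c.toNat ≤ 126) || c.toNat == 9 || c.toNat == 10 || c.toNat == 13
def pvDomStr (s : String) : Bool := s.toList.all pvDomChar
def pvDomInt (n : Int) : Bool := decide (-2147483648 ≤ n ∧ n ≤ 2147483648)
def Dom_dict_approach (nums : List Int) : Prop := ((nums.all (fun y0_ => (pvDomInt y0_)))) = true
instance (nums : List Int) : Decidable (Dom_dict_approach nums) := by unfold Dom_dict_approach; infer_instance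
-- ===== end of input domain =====

-- B changes the algorithm: one counting pass, then each value is appended to rows 0..count-1
-- in a single pass over the counter, instead of A's re-filtering of all keys for every row.

-- ===== PORT A =====
-- counts[i] = 0 if i not in counts.keys() else counts[i] + 1
-- (counts[i] on the else-branch always exists, so getD with any default is exact there)
def pvCountA (nums : List Int) : PySem.Dict Int Int :=
  nums.foldl (fun d i => d.insert i (if d.contains i then d.getD i 0 + 1 else 0)) PySem.Dict.empty

-- the 'while True' loop; fuel nums.length + 1 is proved sufficient below
-- (the loop runs at most max-frequency + 1 ≤ nums.length + 1 times)
def pvLoopA (counts : PySem.Dict Int Int) (ans : List (List Int)) (n : Int) : Nat → List (List Int)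
  | 0 => ans
  | fuel + 1 =>
    let sublist := counts.keys.filter (fun num => decide (n ≤ counts.getD num 0))
    if sublist = [] then ans else pvLoopA counts (ans ++ [sublist]) (n + 1) fuel

def dict_approach (nums : List Int) : List (List Int) :=
  pvLoopA (pvCountA nums) [] 0 (nums.length + 1)

-- ===== PORT B =====
def pvCountB (nums : List Int) : PySem.Dict Int Int :=
  nums.foldl (fun d i => d.insert i (d.getD i 0 + 1)) PySem.Dict.empty

-- body of 'for k in range(c)': if k == len(rows): rows.append([]);  rows[k].append(num)
-- (k comes from range(c), so 0 ≤ k and k.toNat is exact; rows[k] exists whenever Python's does)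
def pvPlace (num : Int) (rows : List (List Int)) (k : Int) : List (List Int) :=
  let rows' := if k = (rows.length : Int) then rows ++ [[]] else rows
  rows'.set k.toNat (rows'.getD k.toNat [] ++ [num])

def dict_approach_alt (nums : List Int) : List (List Int) :=
  (pvCountB nums).items.foldl
    (fun rows p => (PySem.List.pyRange 0 p.2 1).foldl (pvPlace p.1) rows) []

-- ===== PRECONDITION & SPEC =====
def Spec_dict_approach (nums : List Int) (out : List (List Int)) : Prop := out = dict_approach_alt nums
instance (nums : List Int) (out : List (List Int)) : Decidable (Spec_dict_approach nums out) := by unfold Spec_dict_approach; infer_instance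

-- ===== CLAIM (what is proved, stated in full; the proofs are below) =====
def Claim_equal_dict_approach : Prop := ∀ (nums : List Int), Dom_dict_approach nums → Spec_dict_approach nums (dict_approach nums)

-- ===== LEMMAS AND PROOFS =====

-- zip-with-append, padding with the longer list: the common normal form of both programs
def pvZp : List (List Int) → List (List Int) → List (List Int)
  | [], ys => ys
  | x :: xs, [] => x :: xs
  | x :: xs, y :: ys => (x ++ y) :: pvZp xs ys

theorem pvZp_nil_right (xs : List (List Int)) : pvZp xs [] = xs := by
  cases xs <;> rfl

theorem length_pvZp (xs ys : List (List Int)) :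
    (pvZp xs ys).length = max xs.length ys.length := by
  induction xs generalizing ys with
  | nil => simp [pvZp]
  | cons x xs ih =>
    cases ys with
    | nil => simp [pvZp]
    | cons y ys => simp [pvZp, ih]

theorem getD_pvZp (xs ys : List (List Int)) (n : Nat) :
    (pvZp xs ys).getD n [] = xs.getD n [] ++ ys.getD n [] := by
  induction xs generalizing ys n with
  | nil => simp [pvZp]
  | cons x xs ih =>
    cases ys with
    | nil => simp [pvZp]
    | cons y ys => cases n with
      | zero => simp [pvZp]
      | succ n => simpa [pvZp] using ih ys n

theorem pvExt (xs ys : List (List Int)) (hl : xs.length = ys.length)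
    (h : ∀ n, xs.getD n [] = ys.getD n []) : xs = ys := by
  apply List.ext_getElem hl
  intro n h1 h2
  have := h n
  rwa [List.getD_eq_getElem _ _ h1, List.getD_eq_getElem _ _ h2] at this

theorem pvZp_assoc (a b c : List (List Int)) :
    pvZp (pvZp a b) c = pvZp a (pvZp b c) := by
  apply pvExt
  · simp only [length_pvZp]; omega
  · intro n; simp only [getD_pvZp, List.append_assoc]

def pvMaxC (ps : List (Int × Int)) : Nat := ps.foldr (fun p m => max p.2.toNat m) 0

theorem le_pvMaxC (ps : List (Int × Int)) : ∀ p ∈ ps, p.2.toNat ≤ pvMaxC ps := by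
  induction ps with
  | nil => simp
  | cons q ps ih =>
    intro p hp
    have hm : pvMaxC (q :: ps) = max q.2.toNat (pvMaxC ps) := rfl
    rcases List.mem_cons.mp hp with h | h
    · subst h; omega
    · have := ih p h; omega

theorem exists_of_lt_pvMaxC (ps : List (Int × Int)) (n : Nat) (h : n < pvMaxC ps) :
    ∃ p ∈ ps, n < p.2.toNat := by
  induction ps with
  | nil => simp [pvMaxC] at h
  | cons q ps ih =>
    simp only [pvMaxC, List.foldr] at h
    by_cases hq : n < q.2.toNat
    · exact ⟨q, List.mem_cons_self, hq⟩
    · obtain ⟨p, hp, hlt⟩ := ih (by simp [pvMaxC]; omega)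
      exact ⟨p, List.mem_cons_of_mem _ hp, hlt⟩

theorem pvMaxC_le (ps : List (Int × Int)) (N : Nat) (h : ∀ p ∈ ps, p.2.toNat ≤ N) :
    pvMaxC ps ≤ N := by
  induction ps with
  | nil => simp [pvMaxC]
  | cons q ps ih =>
    have h1 := h q List.mem_cons_self
    have h2 := ih (fun p hp => h p (List.mem_cons_of_mem _ hp))
    simp [pvMaxC] at *; omega

-- row n of the result: the keys occurring more than n times, in counter order
def pvRow (ps : List (Int × Int)) (n : Nat) : List Int :=
  (ps.filter (fun p => decide ((n : Int) < p.2))).map Prod.fst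

def pvRows (ps : List (Int × Int)) : List (List Int) :=
  (List.range (pvMaxC ps)).map (pvRow ps)

theorem length_pvRows (ps : List (Int × Int)) : (pvRows ps).length = pvMaxC ps := by
  simp [pvRows]

theorem getD_pvRows (ps : List (Int × Int)) (n : Nat) :
    (pvRows ps).getD n [] = pvRow ps n := by
  by_cases h : n < pvMaxC ps
  · rw [List.getD_eq_getElem _ _ (by simpa [length_pvRows] using h)]
    simp only [pvRows, List.getElem_map, List.getElem_range]
  · rw [List.getD_eq_default _ _ (by simpa [length_pvRows] using not_lt.mp h)]
    symm
    simp only [pvRow, List.map_eq_nil_iff, List.filter_eq_nil_iff]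
    intro p hp
    have := le_pvMaxC ps p hp
    simp only [decide_eq_true_eq]
    omega

theorem pvGetD_replicate (m n : Nat) (a : List Int) :
    (List.replicate m a).getD n [] = if n < m then a else [] := by
  by_cases h : n < m
  · rw [List.getD_eq_getElem _ _ (by simpa using h)]; simp [h]
  · rw [List.getD_eq_default _ _ (by simpa using not_lt.mp h)]; simp [h]

theorem pvRows_cons (p : Int × Int) (ps : List (Int × Int)) :
    pvRows (p :: ps) = pvZp (List.replicate p.2.toNat [p.1]) (pvRows ps) := by
  apply pvExt
  · simp [length_pvRows, length_pvZp, pvMaxC]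
  · intro n
    rw [getD_pvZp, getD_pvRows, getD_pvRows, pvGetD_replicate]
    simp only [pvRow, List.filter_cons]
    by_cases h : (n : Int) < p.2
    · have : n < p.2.toNat := by omega
      simp [h, this]
    · have : ¬ n < p.2.toNat := by omega
      simp [h, this]

theorem pvGetD_set (l : List (List Int)) (i j : Nat) (a : List Int) :
    (l.set i a).getD j [] = if i = j ∧ i < l.length then a else l.getD j [] := by
  rw [List.getD_eq_getElem?_getD, List.getD_eq_getElem?_getD, List.getElem?_set]
  split_ifs with h1 h2 h3 h3 <;> (simp_all; try omega)

-- one inner-loop step at index m turns m stacked copies of [num] into m+1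
theorem pvPlace_step (rows : List (List Int)) (num : Int) (m : Nat) :
    pvPlace num (pvZp rows (List.replicate m [num])) (m : Int)
      = pvZp rows (List.replicate (m + 1) [num]) := by
  have hL : (pvZp rows (List.replicate m [num])).length = max rows.length m := by
    simp [length_pvZp]
  by_cases hr : rows.length ≤ m
  · have hlen : (pvZp rows (List.replicate m [num])).length = m := by omega
    unfold pvPlace
    rw [if_pos (by exact_mod_cast hlen.symm)]
    simp only [Int.toNat_natCast]
    have hget : ((pvZp rows (List.replicate m [num])) ++ [[]]).getD m [] = [] := by
      rw [List.getD_append_right _ _ _ _ (by omega)]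
      simp [hlen]
    rw [hget, List.nil_append]
    apply pvExt
    · rw [List.length_set, List.length_append, hlen, length_pvZp, List.length_replicate]
      simp only [List.length_cons, List.length_nil]
      omega
    · intro j
      rw [pvGetD_set, getD_pvZp, pvGetD_replicate]
      by_cases hj : j = m
      · subst hj
        rw [if_pos ⟨rfl, by simp [hlen]⟩]
        rw [List.getD_eq_default _ _ (by omega)]
        simp
      · rw [if_neg (by simp [hlen]; omega)]
        by_cases hjm : j < m
        · rw [List.getD_append _ _ _ _ (by omega), getD_pvZp, pvGetD_replicate]
          simp [hjm, Nat.lt_succ_of_lt hjm]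
        · rw [List.getD_append_right _ _ _ _ (by omega)]
          rw [List.getD_eq_default _ _ (by simp; omega)]
          rw [List.getD_eq_default _ _ (by omega)]
          simp; omega
  · have hlen : (pvZp rows (List.replicate m [num])).length = rows.length := by omega
    unfold pvPlace
    rw [if_neg (by rw [hlen]; intro hcon; exact hr (by exact_mod_cast hcon.ge))]
    simp only [Int.toNat_natCast]
    apply pvExt
    · simp only [List.length_set, hlen, length_pvZp, List.length_replicate]
      omega
    · intro j
      rw [pvGetD_set, getD_pvZp, pvGetD_replicate]
      by_cases hj : j = m
      · subst hj
        rw [if_pos ⟨rfl, by omega⟩, getD_pvZp, pvGetD_replicate]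
        simp
      · rw [if_neg (by omega), getD_pvZp, pvGetD_replicate, getD_pvZp, pvGetD_replicate]
        by_cases hjm : j < m
        · simp [hjm, Nat.lt_succ_of_lt hjm]
        · have h2 : ¬ j < m + 1 := by omega
          simp [hjm, h2]

theorem pvInner_nat (m : Nat) (rows : List (List Int)) (num : Int) :
    (PySem.List.pyRange 0 (m : Int) 1).foldl (pvPlace num) rows
      = pvZp rows (List.replicate m [num]) := by
  induction m with
  | zero =>
    rw [PySem.List.pyRange_one_eq_nil (by norm_num)]
    simp [pvZp_nil_right]
  | succ m ih =>
    have hc : ((m + 1 : Nat) : Int) = (m : Int) + 1 := by push_cast; ring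
    rw [hc, PySem.List.pyRange_one_succ_right (by positivity), List.foldl_append]
    simp only [List.foldl_cons, List.foldl_nil]
    rw [ih, pvPlace_step]

theorem pvInner_eq (c : Int) (rows : List (List Int)) (num : Int) :
    (PySem.List.pyRange 0 c 1).foldl (pvPlace num) rows
      = pvZp rows (List.replicate c.toNat [num]) := by
  by_cases hc : c ≤ 0
  · rw [PySem.List.pyRange_one_eq_nil hc]
    have : c.toNat = 0 := by omega
    simp [this, pvZp_nil_right]
  · have : c = ((c.toNat : Nat) : Int) := by omega
    rw [this, pvInner_nat, Int.toNat_natCast]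

theorem pvFold_eq (ps : List (Int × Int)) (acc : List (List Int)) :
    ps.foldl (fun rows p => (PySem.List.pyRange 0 p.2 1).foldl (pvPlace p.1) rows) acc
      = pvZp acc (pvRows ps) := by
  induction ps generalizing acc with
  | nil => simp [pvRows, pvMaxC, pvZp_nil_right]
  | cons p ps ih =>
    simp only [List.foldl_cons]
    rw [ih, pvInner_eq, pvZp_assoc, ← pvRows_cons]

def pvPs (nums : List Int) : List (Int × Int) :=
  (PySem.Set.ofList nums).map (fun k => (k, (nums.count k : Int)))

theorem pvCountB_eq (nums : List Int) : pvCountB nums = PySem.Dict.counter nums :=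
  PySem.Dict.foldl_insert_getD_add_one_eq_counter nums

theorem pvAlt_eq (nums : List Int) : dict_approach_alt nums = pvRows (pvPs nums) := by
  unfold dict_approach_alt
  rw [pvFold_eq, pvCountB_eq, PySem.Dict.items_counter]
  rfl

-- A's counter holds multiplicity - 1
theorem pvCountA_getD (l : List Int) (d : PySem.Dict Int Int) (v : Int) :
    (l.foldl (fun d i => d.insert i (if d.contains i then d.getD i 0 + 1 else 0)) d).getD v (-1)
      = d.getD v (-1) + l.count v := by
  induction l generalizing d with
  | nil => simp
  | cons i l ih =>
    simp only [List.foldl_cons]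
    rw [ih, PySem.Dict.getD_insert, List.count_cons]
    by_cases hv : v = i
    · subst hv
      rw [if_pos rfl]
      by_cases hc : d.contains v
      · have hs : (d.get? v).isSome := by
          rw [← PySem.Dict.contains_eq_isSome_get?, hc]
        obtain ⟨w, hw⟩ := Option.isSome_iff_exists.mp hs
        rw [PySem.Dict.getD_of_get?_eq_some _ _ hw, PySem.Dict.getD_of_get?_eq_some _ _ hw]
        simp [hc]
        omega
      · rw [if_neg hc, PySem.Dict.getD_of_not_contains _ _ (by simpa using hc)]
        simp only [beq_self_eq_true, if_true]
        push_cast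
        omega
    · rw [if_neg hv]
      have : (i == v) = false := by simp [Ne.symm hv]
      simp [this]

theorem pvCountA_keys (nums : List Int) : (pvCountA nums).keys = PySem.Set.ofList nums := by
  unfold pvCountA
  rw [PySem.Dict.keys_foldl_insert, PySem.Dict.keys_empty, PySem.Set.update_nil_left]

theorem pvSublist_eq (nums : List Int) (j : Nat) :
    (pvCountA nums).keys.filter (fun num => decide ((j : Int) ≤ (pvCountA nums).getD num 0))
      = (pvRows (pvPs nums)).getD j [] := by
  rw [getD_pvRows]
  unfold pvRow pvPs
  rw [List.filter_map, List.map_map, pvCountA_keys]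
  have hmap : (Prod.fst ∘ fun k => (k, (nums.count k : Int))) = id := rfl
  rw [hmap, List.map_id]
  apply List.filter_congr
  intro num hnum
  have hmem : num ∈ nums := (PySem.Set.mem_ofList _ _).mp hnum
  have hcon : (pvCountA nums).contains num = true := by
    rw [PySem.Dict.contains_iff_mem_keys, pvCountA_keys]
    exact hnum
  have hs : ((pvCountA nums).get? num).isSome := by
    rw [← PySem.Dict.contains_eq_isSome_get?, hcon]
  obtain ⟨w, hw⟩ := Option.isSome_iff_exists.mp hs
  have h1 : (pvCountA nums).getD num (-1) = (-1) + (nums.count num : Int) := by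
    have := pvCountA_getD nums PySem.Dict.empty num
    simpa [pvCountA] using this
  have h2 : (pvCountA nums).getD num (-1) = w := PySem.Dict.getD_of_get?_eq_some _ _ hw
  have h3 : (pvCountA nums).getD num 0 = w := PySem.Dict.getD_of_get?_eq_some _ _ hw
  have hval : (pvCountA nums).getD num 0 = (nums.count num : Int) - 1 := by omega
  rw [hval]
  simp only [Function.comp, decide_eq_decide]
  omega

theorem pvRow_ne_nil (nums : List Int) (j : Nat) (h : j < pvMaxC (pvPs nums)) :
    (pvRows (pvPs nums)).getD j [] ≠ [] := by
  obtain ⟨p, hp, hlt⟩ := exists_of_lt_pvMaxC _ _ h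
  rw [getD_pvRows]
  intro hnil
  have hmem : p ∈ (pvPs nums).filter (fun p => decide ((j : Int) < p.2)) :=
    List.mem_filter.mpr ⟨hp, by simp; omega⟩
  rw [pvRow] at hnil
  rw [List.map_eq_nil_iff] at hnil
  rw [hnil] at hmem
  exact absurd hmem (List.not_mem_nil)

theorem pvLoopA_eq (nums : List Int) (fuel j : Nat) (ans : List (List Int))
    (h : pvMaxC (pvPs nums) ≤ j + fuel) :
    pvLoopA (pvCountA nums) ans (j : Int) fuel = ans ++ (pvRows (pvPs nums)).drop j := by
  induction fuel generalizing j ans with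
  | zero =>
    rw [List.drop_eq_nil_of_le (by rw [length_pvRows]; omega)]
    simp [pvLoopA]
  | succ fuel ih =>
    simp only [pvLoopA]
    rw [pvSublist_eq nums j]
    by_cases hj : j < pvMaxC (pvPs nums)
    · rw [if_neg (pvRow_ne_nil nums j hj)]
      have hc : (j : Int) + 1 = ((j + 1 : Nat) : Int) := by push_cast; ring
      rw [hc, ih (j + 1) _ (by omega), List.append_assoc]
      congr 1
      have hjl : j < (pvRows (pvPs nums)).length := by rw [length_pvRows]; omega
      rw [List.getD_eq_getElem _ _ hjl]
      simp only [List.singleton_append]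
      exact List.getElem_cons_drop hjl
    · have hnil : (pvRows (pvPs nums)).getD j [] = [] :=
        List.getD_eq_default _ _ (by rw [length_pvRows]; omega)
      rw [hnil, if_pos rfl, List.drop_eq_nil_of_le (by rw [length_pvRows]; omega)]
      simp

theorem pvMaxC_pvPs_le (nums : List Int) : pvMaxC (pvPs nums) ≤ nums.length := by
  apply pvMaxC_le
  intro p hp
  simp only [pvPs, List.mem_map] at hp
  obtain ⟨k, _, rfl⟩ := hp
  simpa using List.count_le_length

-- ===== VERDICT (by name: the statement is the Claim_ definition above) =====
theorem dict_approach_spec : Claim_equal_dict_approach := by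
  intro nums _
  unfold Spec_dict_approach dict_approach
  have h0 : (0 : Int) = ((0 : Nat) : Int) := rfl
  rw [h0, pvLoopA_eq nums (nums.length + 1) 0 [] (by have := pvMaxC_pvPs_le nums; omega)]
  rw [pvAlt_eq]
  simp
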